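-- pv_equiv track=rewrite | github.com/graytoli/Labs | pdx_lab24v2.py | max_rainfall
-- ===== SOURCE A (Python) =====
-- def max_rainfall(some_list):
--     amounts_list = []
--     for tup in some_list:
--         amounts_list.append(tup[1])
--     max_num = max(amounts_list)
--     num_idx = amounts_list.index(max_num)
--     max_day = some_list[num_idx]
--     return max_day
-- ===== SOURCE B (Python) =====
-- def max_rainfall(some_list):
--     if not some_list:
--         raise ValueError("max_rainfall() arg is an empty sequence")
--     best_tuple = some_list[0]
--     best_amount = best_tuple[1]
--     for tup in some_list[1:]:
--         if tup[1] > best_amount: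
--             best_amount = tup[1]
--             best_tuple = tup
--     return best_tuple
-- ===== Notes on version B (the rewrite author's own statement) =====
-- stated objective: simpler
-- what changed: Replaced the three-pass scheme (build an auxiliary amounts list, max() over it, .index() to find its position, then index back into the input) by a single pass that keeps the best tuple so far, with strict > so ties keep the earliest tuple like .index() does.
import Mathlib
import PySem

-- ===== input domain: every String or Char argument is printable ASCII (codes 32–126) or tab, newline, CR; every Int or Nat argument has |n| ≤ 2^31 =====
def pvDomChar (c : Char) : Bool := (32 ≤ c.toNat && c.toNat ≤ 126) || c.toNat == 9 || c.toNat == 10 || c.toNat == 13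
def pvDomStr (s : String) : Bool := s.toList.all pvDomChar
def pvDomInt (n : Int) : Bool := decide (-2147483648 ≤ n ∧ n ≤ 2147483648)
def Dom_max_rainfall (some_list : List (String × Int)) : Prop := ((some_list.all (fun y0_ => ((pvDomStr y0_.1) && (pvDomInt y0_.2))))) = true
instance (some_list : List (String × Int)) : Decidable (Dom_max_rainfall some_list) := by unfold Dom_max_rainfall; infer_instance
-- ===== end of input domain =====

-- B replaces A's three passes (collect amounts, max(), .index(), index back) by one
-- running-best scan; objective: simpler (O(1) extra space). Both raise on the empty list
-- (A: max([]) ValueError, B: explicit ValueError), which Pre_ excludes.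

-- ===== PORT A =====
def max_rainfall (some_list : List (String × Int)) : String × Int :=
  let amounts_list := some_list.foldl (fun acc tup => acc ++ [tup.2]) []
  match PySem.List.max? amounts_list (fun y => y) with
  | none => ("", 0)      -- max([]) raises ValueError; excluded by Pre_
  | some max_num =>
    match PySem.List.index? amounts_list max_num with
    | none => ("", 0)    -- unreachable: max_num ∈ amounts_list
    | some num_idx =>
      match PySem.List.pyGet? some_list (num_idx : Int) with
      | none => ("", 0)  -- unreachable: num_idx < length
      | some max_day => max_day

-- ===== PORT B =====
def max_rainfall_alt (some_list : List (String × Int)) : String × Int :=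
  match some_list with
  | [] => ("", 0)        -- Source B raises ValueError here; excluded by Pre_
  | x :: rest =>
    (rest.foldl
      (fun (st : (String × Int) × Int) tup =>
        if st.2 < tup.2 then (tup, tup.2) else st)
      (x, x.2)).1

-- ===== PRECONDITION & SPEC =====
-- Pre_ excludes exactly the empty list, on which Python A raises ValueError (max of empty sequence).
def Pre_max_rainfall (some_list : List (String × Int)) : Prop := some_list ≠ []
instance (some_list : List (String × Int)) : Decidable (Pre_max_rainfall some_list) := by unfold Pre_max_rainfall; infer_instance
def pvWitness_max_rainfall : (List (String × Int)) := [("mon", 3), ("tue", 7), ("wed", 7)]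
def Spec_max_rainfall (some_list : List (String × Int)) (out : String × Int) : Prop := out = max_rainfall_alt some_list
instance (some_list : List (String × Int)) (out : String × Int) : Decidable (Spec_max_rainfall some_list out) := by unfold Spec_max_rainfall; infer_instance

-- ===== CLAIM =====
def Claim_equal_max_rainfall : Prop := ∀ (some_list : List (String × Int)), Dom_max_rainfall some_list → Pre_max_rainfall some_list → Spec_max_rainfall some_list (max_rainfall some_list)

-- ===== LEMMAS AND PROOFS =====

/-- the earliest tuple with maximal second component, as a recursion (proof-only helper) -/
def pvArgmax : (String × Int) → List (String × Int) → String × Int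
  | b, [] => b
  | b, y :: t => if b.2 < y.2 then pvArgmax y t else pvArgmax b t

theorem pvB_eq (t : List (String × Int)) (x : String × Int) :
    (t.foldl (fun (st : (String × Int) × Int) tup =>
        if st.2 < tup.2 then (tup, tup.2) else st) (x, x.2)).1 = pvArgmax x t := by
  induction t generalizing x with
  | nil => rfl
  | cons y t ih =>
    simp only [List.foldl_cons, pvArgmax]
    by_cases h : x.2 < y.2 <;> simp [h, ih]

theorem pvAmounts_eq (l : List (String × Int)) (acc : List Int) :
    l.foldl (fun acc tup => acc ++ [tup.2]) acc = acc ++ l.map (·.2) := by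
  induction l generalizing acc with
  | nil => simp
  | cons y t ih => simp [List.foldl_cons, ih]

theorem pvKey (t : List (String × Int)) (x : String × Int) :
    (PySem.List.index? (x.2 :: t.map (·.2)) ((t.map (·.2)).foldl max x.2)).bind
      (fun k => (x :: t)[k]?) = some (pvArgmax x t) := by
  induction t generalizing x with
  | nil =>
    simp [pvArgmax]
  | cons y t ih =>
    have hx := (PySem.List.le_foldl_max (t.map (·.2)) (max x.2 y.2)).1
    simp only [List.map_cons, List.foldl_cons, pvArgmax]
    by_cases h : x.2 < y.2
    · -- head x is strictly beaten by y, so the max differs from x.2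
      have hmx : max x.2 y.2 = y.2 := max_eq_right h.le
      rw [hmx] at hx ⊢
      have hne : x.2 ≠ (t.map (·.2)).foldl max y.2 := by omega
      rw [PySem.List.index?_cons_of_ne _ hne, if_pos h]
      have hih := ih y
      cases hidx : PySem.List.index? (y.2 :: t.map (·.2)) ((t.map (·.2)).foldl max y.2) with
      | none => rw [hidx] at hih; simp at hih
      | some k => rw [hidx] at hih; simpa using hih
    · have hy : y.2 ≤ x.2 := le_of_not_gt h
      have hmx : max x.2 y.2 = x.2 := max_eq_left hy
      rw [hmx] at hx ⊢
      rw [if_neg h]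
      have hih := ih x
      by_cases hM : (t.map (·.2)).foldl max x.2 = x.2
      · -- the max is the head value itself: both sides pick index 0, i.e. x
        rw [hM] at hih ⊢
        rw [PySem.List.index?_cons_self] at hih ⊢
        simp only [Option.bind_some] at hih ⊢
        simpa using hih
      · -- the max lies strictly beyond both x and y
        have hne : x.2 ≠ (t.map (·.2)).foldl max x.2 := fun he => hM he.symm
        have hney : y.2 ≠ (t.map (·.2)).foldl max x.2 := by omega
        rw [PySem.List.index?_cons_of_ne _ hne] at hih
        rw [PySem.List.index?_cons_of_ne _ hne, PySem.List.index?_cons_of_ne _ hney]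
        cases hidx : PySem.List.index? (t.map (·.2)) ((t.map (·.2)).foldl max x.2) with
        | none => rw [hidx] at hih; simp at hih
        | some k => rw [hidx] at hih; simpa using hih

-- ===== VERDICT =====
theorem max_rainfall_spec : Claim_equal_max_rainfall := by
  intro some_list _ hpre
  unfold Spec_max_rainfall
  cases some_list with
  | nil => exact absurd rfl hpre
  | cons x t =>
    have hB : max_rainfall_alt (x :: t) = pvArgmax x t := by
      simp only [max_rainfall_alt]
      exact pvB_eq t x
    rw [hB]
    have hkey := pvKey t x
    unfold max_rainfall
    simp only [pvAmounts_eq, List.nil_append, List.map_cons, PySem.List.max?_id_cons]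
    cases hidx : PySem.List.index? (x.2 :: t.map (·.2)) ((t.map (·.2)).foldl max x.2) with
    | none => rw [hidx] at hkey; simp at hkey
    | some k =>
      rw [hidx] at hkey
      simp only [Option.bind_some] at hkey
      simp only [PySem.List.pyGet?_natCast, hkey]
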